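-- pv_equiv track=rewrite | github.com/c-prungo/google-foobar | Level 1/re-id/solution.py | get_prime_sequence
-- ===== SOURCE A (Python) =====
-- def get_prime_sequence(n):
--
--     prime_sequence = ""
--
--     primes_table = [True for i in range(n+1)]
--     p_num = 2
--
--     # apply Eratosthenes sieve to tabulate primes up to number n
--     while (p_num**2 <= n):
--         # if a prime is identified, iterate through all of its products and set them to false (as they are divisible by p_num on principle)
--         if (primes_table[p_num] == True):
--             for i in range(p_num**2, n+1, p_num):
--                 primes_table[i] = False
--         p_num += 1
--
--     # use table to generate prime_sequence
--     for p in range(2, n):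
--         if primes_table[p]:
--             prime_sequence += str(p)
--
--     return prime_sequence
-- ===== SOURCE B (Python) =====
-- def _is_prime(p):
--     d = 2
--     while d * d <= p:
--         if p % d == 0:
--             return False
--         d += 1
--     return True
--
--
-- def get_prime_sequence(n):
--     return "".join(str(p) for p in range(2, n) if _is_prime(p))
-- ===== Notes on version B (the rewrite author's own statement) =====
-- stated objective: simpler
-- what changed: Replaces the build-a-sieve-table-then-scan strategy with a direct per-number trial-division primality test (divisors d with d*d <= p) and a join over a filtered range.
import Mathlib
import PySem

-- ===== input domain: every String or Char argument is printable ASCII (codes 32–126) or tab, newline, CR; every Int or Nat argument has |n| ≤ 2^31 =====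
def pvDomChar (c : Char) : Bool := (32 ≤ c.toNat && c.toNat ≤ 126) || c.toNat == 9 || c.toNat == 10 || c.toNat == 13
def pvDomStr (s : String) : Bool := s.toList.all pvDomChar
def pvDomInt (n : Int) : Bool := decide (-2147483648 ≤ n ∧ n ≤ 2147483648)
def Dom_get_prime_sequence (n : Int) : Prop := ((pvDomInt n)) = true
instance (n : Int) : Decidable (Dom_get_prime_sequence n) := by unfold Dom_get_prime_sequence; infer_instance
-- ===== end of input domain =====

-- B replaces A's build-a-sieve-table-then-scan strategy with a per-number trial-division
-- primality test joined over the range; objective: simpler.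

-- ===== PORT A =====
-- needed by both while-loops' termination (cited in decreasing_by)
lemma pv_le_mul_self (p : Int) : p ≤ p * p := by nlinarith [sq_nonneg p, sq_nonneg (p - 1)]

-- while (p_num**2 <= n): if primes_table[p_num]: for i in range(p_num**2, n+1, p_num): primes_table[i] = False; p_num += 1
def pvSieveLoop (n : Int) (table : List Bool) (p : Int) : List Bool :=
  if _h : p * p ≤ n then
    pvSieveLoop n
      (if PySem.List.pyGetD table p false = true then
        (PySem.List.pyRange (p * p) (n + 1) p).foldl (fun t i => PySem.List.pySetD t i false) table
      else table)
      (p + 1)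
  else table
termination_by (n + 1 - p).toNat
decreasing_by have := pv_le_mul_self p; omega

def get_prime_sequence (n : Int) : String :=
  let table := pvSieveLoop n ((PySem.List.pyRange 0 (n + 1) 1).map (fun _ => true)) 2
  String.ofList ((PySem.List.pyRange 2 n 1).foldl
    (fun acc p => if PySem.List.pyGetD table p false = true then acc ++ PySem.Int.toChars p else acc) [])

-- ===== PORT B =====
-- def _is_prime(p): d = 2; while d*d <= p: if p % d == 0: return False; d += 1; return True
def pvTrialLoop (p d : Int) : Bool :=
  if _h : d * d ≤ p then
    if PySem.Int.mod p d = 0 then false else pvTrialLoop p (d + 1)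
  else true
termination_by (p + 1 - d).toNat
decreasing_by have := pv_le_mul_self d; omega

def pvIsPrime (p : Int) : Bool := pvTrialLoop p 2

-- return "".join(str(p) for p in range(2, n) if _is_prime(p))
def get_prime_sequence_alt (n : Int) : String :=
  String.ofList (PySem.Chars.join []
    (((PySem.List.pyRange 2 n 1).filter pvIsPrime).map PySem.Int.toChars))

-- ===== PRECONDITION & SPEC =====
def Spec_get_prime_sequence (n : Int) (out : String) : Prop := out = get_prime_sequence_alt n
instance (n : Int) (out : String) : Decidable (Spec_get_prime_sequence n out) := by unfold Spec_get_prime_sequence; infer_instance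

-- ===== CLAIM (what is proved, stated in full; the proofs are below) =====
def Claim_equal_get_prime_sequence : Prop := ∀ (n : Int), Dom_get_prime_sequence n → Spec_get_prime_sequence n (get_prime_sequence n)

-- ===== LEMMAS AND PROOFS =====

lemma pv_sq_lt (q p : Int) (hq : 0 ≤ q) (hp : 0 ≤ p) (h : q * q < p * p) : q < p := by nlinarith

-- a prime has no divisor q with 2 ≤ q and q*q ≤ it
lemma pv_prime_no_small (j q : Int) (hj : 2 ≤ j) (hpr : j.toNat.Prime)
    (hq : 2 ≤ q) (hd : q ∣ j) (hqq : q * q ≤ j) : False := by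
  have hdn : q.toNat ∣ j.toNat := by
    have h1 : q.natAbs ∣ j.natAbs := Int.natAbs_dvd_natAbs.mpr hd
    have e1 : q.natAbs = q.toNat := by omega
    have e2 : j.natAbs = j.toNat := by omega
    rwa [e1, e2] at h1
  rcases (Nat.Prime.eq_one_or_self_of_dvd hpr _ hdn) with h1 | h1
  · omega
  · have hqj : q = j := by omega
    nlinarith

-- a non-prime j ≥ 2 has a prime divisor q with q*q ≤ j (its least factor)
lemma pv_exists_small_factor (j : Int) (hj : 2 ≤ j) (hnp : ¬ j.toNat.Prime) :
    ∃ q : Int, 2 ≤ q ∧ q.toNat.Prime ∧ q ∣ j ∧ q * q ≤ j := by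
  have hne : j.toNat ≠ 1 := by omega
  have hpr : j.toNat.minFac.Prime := Nat.minFac_prime hne
  have h2le : (2 : Int) ≤ (j.toNat.minFac : Int) := by exact_mod_cast hpr.two_le
  have hprI : ((j.toNat.minFac : Int)).toNat.Prime := by
    rw [Int.toNat_natCast]; exact hpr
  have hdvd : (j.toNat.minFac : Int) ∣ j := by
    have h2 : (j.toNat.minFac : Int) ∣ (j.toNat : Int) := Int.natCast_dvd_natCast.mpr (Nat.minFac_dvd j.toNat)
    rwa [Int.toNat_of_nonneg (by omega)] at h2
  have hsq : (j.toNat.minFac : Int) * (j.toNat.minFac : Int) ≤ j := by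
    have h3 := Nat.minFac_sq_le_self (n := j.toNat) (by omega) hnp
    have h4 : ((j.toNat.minFac ^ 2 : Nat) : Int) ≤ ((j.toNat : Nat) : Int) := by exact_mod_cast h3
    rw [Int.toNat_of_nonneg (by omega)] at h4
    push_cast at h4
    nlinarith [h4]
  exact ⟨(j.toNat.minFac : Int), h2le, hprI, hdvd, hsq⟩

lemma pv_prime_iff_no_small (j : Int) (hj : 2 ≤ j) :
    j.toNat.Prime ↔ ∀ q : Int, 2 ≤ q → q * q ≤ j → ¬ q ∣ j := by
  constructor
  · intro hpr q hq hqq hd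
    exact pv_prime_no_small j q hj hpr hq hd hqq
  · intro hno
    by_contra hnp
    obtain ⟨q, hq2, _, hqd, hqq⟩ := pv_exists_small_factor j hj hnp
    exact hno q hq2 hqq hqd

lemma pv_trialLoop_spec (p d : Int) (hd : 2 ≤ d) :
    pvTrialLoop p d = true ↔ ∀ e : Int, d ≤ e → e * e ≤ p → ¬ e ∣ p := by
  rw [pvTrialLoop]
  split_ifs with h hm
  · have hdvd : d ∣ p := (PySem.Int.mod_eq_zero_iff_dvd p d).mp hm
    simp only [false_iff]
    push Not
    exact ⟨d, le_refl d, h, hdvd⟩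
  · rw [pv_trialLoop_spec p (d + 1) (by omega)]
    have hnd : ¬ d ∣ p := fun hdv => hm ((PySem.Int.mod_eq_zero_iff_dvd p d).mpr hdv)
    constructor
    · intro hall e he hee
      rcases eq_or_lt_of_le he with rfl | hlt
      · exact hnd
      · exact hall e (by omega) hee
    · intro hall e he hee
      exact hall e (by omega) hee
  · simp only [true_iff]
    intro e he hee hdv
    have : d * d ≤ e * e := by nlinarith
    omega
termination_by (p + 1 - d).toNat
decreasing_by have := pv_le_mul_self d; omega

lemma pv_isPrime_iff (p : Int) (hp : 2 ≤ p) : pvIsPrime p = true ↔ p.toNat.Prime := by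
  unfold pvIsPrime
  rw [pv_trialLoop_spec p 2 (le_refl 2), pv_prime_iff_no_small p hp]

lemma pv_length_foldl_set (L : List Int) (t : List Bool) :
    (L.foldl (fun t i => PySem.List.pySetD t i false) t).length = t.length := by
  induction L generalizing t with
  | nil => rfl
  | cons i L ih => simp [List.foldl_cons, ih, PySem.List.length_pySetD]

lemma pv_getD_foldl_set (L : List Int) (t : List Bool) (j : Int)
    (hL : ∀ i ∈ L, 0 ≤ i ∧ i < (t.length : Int)) (hj0 : 0 ≤ j) (hjl : j < (t.length : Int)) :
    PySem.List.pyGetD (L.foldl (fun t i => PySem.List.pySetD t i false) t) j false =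
      if j ∈ L then false else PySem.List.pyGetD t j false := by
  induction L generalizing t with
  | nil => simp
  | cons i L ih =>
    obtain ⟨hi0, hil⟩ := hL i (List.mem_cons_self ..)
    have hlen : (PySem.List.pySetD t i false).length = t.length := PySem.List.length_pySetD ..
    rw [List.foldl_cons, ih (PySem.List.pySetD t i false)
      (fun x hx => by have := hL x (List.mem_cons_of_mem _ hx); omega) (by omega)]
    by_cases hjL : j ∈ L
    · simp [hjL]
    · by_cases hji : j = i
      · subst hji
        have e1 : PySem.List.pyGetD (PySem.List.pySetD t j false) j false = false := by
          rw [PySem.List.pySetD_of_nonneg t false hj0,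
            PySem.List.pyGetD_eq_getElem _ false hj0 (by simpa [List.length_set] using hjl)]
          simp
        simp [e1, hjL]
      · have e1 : PySem.List.pyGetD (PySem.List.pySetD t i false) j false =
            PySem.List.pyGetD t j false := by
          rw [PySem.List.pySetD_of_nonneg t false hi0,
            PySem.List.pyGetD_eq_getElem _ false hj0 (by simpa [List.length_set] using hjl),
            PySem.List.pyGetD_eq_getElem _ false hj0 hjl,
            List.getElem_set_ne (by omega)]
        simp [e1, hjL, hji]

-- the sieve invariant: after the loop, table[j] detects exactly the primes j ≤ n
lemma pv_sieve_post (n p : Int) (table : List Bool) (hp : 2 ≤ p)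
    (hlen : table.length = (n + 1).toNat)
    (hinv : ∀ j : Int, 0 ≤ j → j ≤ n →
      (PySem.List.pyGetD table j false = true ↔
        ¬ ∃ q : Int, 2 ≤ q ∧ q < p ∧ q.toNat.Prime ∧ q ∣ j ∧ q * q ≤ j))
    (j : Int) (hj2 : 2 ≤ j) (hjn : j ≤ n) :
    PySem.List.pyGetD (pvSieveLoop n table p) j false = true ↔ j.toNat.Prime := by
  rw [pvSieveLoop]
  split_ifs with h hb
  · -- loop body, table[p] was true: p is prime, mark its multiples
    have hpn : p ≤ n := le_trans (pv_le_mul_self p) h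
    have hppr : p.toNat.Prime := by
      rw [hinv p (by omega) hpn] at hb
      by_contra hnp
      obtain ⟨q, hq2, hqpr, hqd, hqq⟩ := pv_exists_small_factor p hp hnp
      have hqlt : q < p := pv_sq_lt q p (by omega) (by omega) (by nlinarith)
      exact hb ⟨q, hq2, hqlt, hqpr, hqd, hqq⟩
    have hRmem : ∀ i : Int, i ∈ PySem.List.pyRange (p * p) (n + 1) p ↔
        p * p ≤ i ∧ i < n + 1 ∧ p ∣ i := by
      intro i
      rw [PySem.List.mem_pyRange_iff_of_pos (by omega) i]
      constructor
      · rintro ⟨h1, h2, h3⟩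
        refine ⟨h1, h2, ?_⟩
        have := dvd_add h3 (dvd_mul_left p p)
        simpa using this
      · rintro ⟨h1, h2, h3⟩
        exact ⟨h1, h2, dvd_sub h3 (dvd_mul_left p p)⟩
    refine pv_sieve_post n (p + 1)
      ((PySem.List.pyRange (p * p) (n + 1) p).foldl (fun t i => PySem.List.pySetD t i false) table)
      (by omega) (by rw [pv_length_foldl_set]; exact hlen) ?_ j hj2 hjn
    intro j' hj'0 hj'n
    rw [pv_getD_foldl_set _ table j'
      (fun i hi => by
        have := (hRmem i).mp hi
        constructor
        · nlinarith [this.1]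
        · rw [hlen]; omega)
      hj'0 (by rw [hlen]; omega)]
    by_cases hmem : j' ∈ PySem.List.pyRange (p * p) (n + 1) p
    · rw [if_pos hmem]
      obtain ⟨h1, _, h3⟩ := (hRmem j').mp hmem
      simp only [Bool.false_eq_true, false_iff, not_not]
      exact ⟨p, hp, by omega, hppr, h3, h1⟩
    · rw [if_neg hmem, hinv j' hj'0 hj'n]
      constructor
      · rintro hno ⟨q, hq2, hqlt, hqpr, hqd, hqq⟩
        rcases eq_or_lt_of_le (show q ≤ p by omega) with rfl | hqp
        · exact hmem ((hRmem j').mpr ⟨hqq, by omega, hqd⟩)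
        · exact hno ⟨q, hq2, hqp, hqpr, hqd, hqq⟩
      · rintro hno ⟨q, hq2, hqlt, hqpr, hqd, hqq⟩
        exact hno ⟨q, hq2, by omega, hqpr, hqd, hqq⟩
  · -- loop body, table[p] was false: p is composite, nothing marked
    have hpn : p ≤ n := le_trans (pv_le_mul_self p) h
    have hnpr : ¬ p.toNat.Prime := by
      intro hpr
      apply hb
      rw [hinv p (by omega) hpn]
      rintro ⟨q, hq2, _, _, hqd, hqq⟩
      exact pv_prime_no_small p q hp hpr hq2 hqd hqq
    refine pv_sieve_post n (p + 1) table (by omega) hlen ?_ j hj2 hjn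
    intro j' hj'0 hj'n
    rw [hinv j' hj'0 hj'n]
    constructor
    · rintro hno ⟨q, hq2, hqlt, hqpr, hqd, hqq⟩
      rcases eq_or_lt_of_le (show q ≤ p by omega) with rfl | hqp
      · exact hnpr hqpr
      · exact hno ⟨q, hq2, hqp, hqpr, hqd, hqq⟩
    · rintro hno ⟨q, hq2, hqlt, hqpr, hqd, hqq⟩
      exact hno ⟨q, hq2, by omega, hqpr, hqd, hqq⟩
  · -- loop done: n < p*p
    rw [hinv j (by omega) hjn]
    constructor
    · intro hno
      by_contra hnp
      obtain ⟨q, hq2, hqpr, hqd, hqq⟩ := pv_exists_small_factor j hj2 hnp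
      have hqlt : q < p := pv_sq_lt q p (by omega) (by omega) (by nlinarith)
      exact hno ⟨q, hq2, hqlt, hqpr, hqd, hqq⟩
    · rintro hpr ⟨q, hq2, _, _, hqd, hqq⟩
      exact pv_prime_no_small j q hj2 hpr hq2 hqd hqq
termination_by (n + 1 - p).toNat
decreasing_by all_goals (have := pv_le_mul_self p; omega)

lemma pv_join_nil_eq_flatten (l : List (List Char)) : PySem.Chars.join [] l = l.flatten := by
  induction l with
  | nil => rfl
  | cons x xs ih =>
    cases xs with
    | nil => simp [PySem.Chars.join, List.intercalate]
    | cons y ys =>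
      simp only [PySem.Chars.join, List.intercalate, List.intersperse, List.flatten] at *
      simp [ih]

-- ===== VERDICT (by name: the statement is the Claim_ definition above) =====
theorem get_prime_sequence_spec : Claim_equal_get_prime_sequence := by
  intro n _
  unfold Spec_get_prime_sequence get_prime_sequence get_prime_sequence_alt
  by_cases hn : 2 ≤ n
  · have hlen0 : ((PySem.List.pyRange 0 (n + 1) 1).map (fun _ => true)).length = (n + 1).toNat := by
      simp [PySem.List.length_pyRange_one]
    have hpost := pv_sieve_post n 2
      ((PySem.List.pyRange 0 (n + 1) 1).map (fun (_ : Int) => true)) (le_refl 2) hlen0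
      (by
        intro j hj0 hjn
        rw [PySem.List.pyGetD_map_pyRange_of_nonneg (fun _ => true) (n + 1) j false hj0 (by omega)]
        simp only [true_iff]
        rintro ⟨q, hq1, hq2, _⟩
        omega)
    have hcong : (PySem.List.pyRange 2 n 1).foldl
        (fun acc p => if PySem.List.pyGetD
            (pvSieveLoop n ((PySem.List.pyRange 0 (n + 1) 1).map (fun _ => true)) 2) p false = true
          then acc ++ PySem.Int.toChars p else acc) [] =
        (PySem.List.pyRange 2 n 1).foldl
        (fun acc p => if pvIsPrime p = true then acc ++ PySem.Int.toChars p else acc) [] := by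
      apply PySem.List.foldl_congr_mem
      intro acc p hp
      have hmem := (PySem.List.mem_pyRange_one).mp hp
      have heq : PySem.List.pyGetD
          (pvSieveLoop n ((PySem.List.pyRange 0 (n + 1) 1).map (fun _ => true)) 2) p false =
          pvIsPrime p := by
        rw [Bool.eq_iff_iff, hpost p hmem.1 (by omega), pv_isPrime_iff p hmem.1]
      rw [heq]
    show String.ofList ((PySem.List.pyRange 2 n 1).foldl
        (fun acc p => if PySem.List.pyGetD
            (pvSieveLoop n ((PySem.List.pyRange 0 (n + 1) 1).map (fun _ => true)) 2) p false = true
          then acc ++ PySem.Int.toChars p else acc) []) =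
      String.ofList (PySem.Chars.join []
        (((PySem.List.pyRange 2 n 1).filter pvIsPrime).map PySem.Int.toChars))
    rw [hcong, PySem.List.foldl_ite_eq_foldl_filter, PySem.List.foldl_append_eq_flatMap,
      pv_join_nil_eq_flatten, List.flatMap_def]
    simp
  · have hnil : PySem.List.pyRange 2 n 1 = [] := PySem.List.pyRange_one_eq_nil (by omega)
    simp [hnil, PySem.Chars.join, List.intercalate]
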